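-- pv_equiv track=rewrite | github.com/yunfanzhou/pygeodesic | tests/test_faces_and_barycentric.py | build_face_adjacency
-- ===== SOURCE A (Python) =====
-- def build_face_adjacency(faces):
--     """Return dict mapping face_id -> set of face_ids sharing at least one vertex."""
--     from collections import defaultdict
--     vertex_to_faces = defaultdict(set)
--     for fid, f in enumerate(faces):
--         for v in f:
--             vertex_to_faces[v].add(fid)
--     adj = {}
--     for fid, f in enumerate(faces):
--         neighbours = set()
--         for v in f:
--             neighbours |= vertex_to_faces[v]
--         adj[fid] = neighbours
--     return adj
-- ===== SOURCE B (Python) =====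
-- def build_face_adjacency(faces):
--     """Return dict mapping face_id -> set of face_ids sharing at least one vertex."""
--     adj = {}
--     for fid, f in enumerate(faces):
--         neighbours = set()
--         for v in f:
--             for other, g in enumerate(faces):
--                 if v in g:
--                     neighbours.add(other)
--         adj[fid] = neighbours
--     return adj
-- ===== Notes on version B (the rewrite author's own statement) =====
-- stated objective: alternative
-- what changed: B drops the vertex-to-faces index and the two-pass set union entirely: a single pass over faces does, for each vertex of a face, a direct scan of all faces and adds every face containing that vertex to the neighbour set.
import Mathlib
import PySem

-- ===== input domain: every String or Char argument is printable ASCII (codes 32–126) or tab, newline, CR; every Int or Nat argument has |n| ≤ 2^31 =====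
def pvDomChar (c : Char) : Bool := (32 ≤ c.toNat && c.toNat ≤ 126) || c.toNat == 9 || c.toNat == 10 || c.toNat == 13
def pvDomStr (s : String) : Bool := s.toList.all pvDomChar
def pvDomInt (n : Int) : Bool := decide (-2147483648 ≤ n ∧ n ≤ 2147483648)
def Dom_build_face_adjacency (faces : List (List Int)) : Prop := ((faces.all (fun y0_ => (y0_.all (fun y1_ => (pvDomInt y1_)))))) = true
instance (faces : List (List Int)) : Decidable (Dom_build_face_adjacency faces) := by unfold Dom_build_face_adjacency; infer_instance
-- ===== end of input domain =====

-- B replaces A's vertex-to-faces index and two-pass set union by one pass with a direct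
-- nested scan over faces (alternative decomposition, same return value; not faster).

-- ===== PORT A =====
def build_face_adjacency (faces : List (List Int)) : List (Int × List Int) :=
  let vertex_to_faces : PySem.Dict Int (PySem.Set Int) :=
    (PySem.List.enumerate faces).foldl
      (fun d p => p.2.foldl (fun d v => d.modify v PySem.Set.empty (fun s => PySem.Set.add s p.1)) d)
      PySem.Dict.empty
  let adj : PySem.Dict Int (PySem.Set Int) :=
    (PySem.List.enumerate faces).foldl
      (fun a p =>
        a.insert p.1
          (p.2.foldl (fun s v => PySem.Set.union s (vertex_to_faces.getD v PySem.Set.empty))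
            PySem.Set.empty))
      PySem.Dict.empty
  adj.items

-- ===== PORT B =====
def build_face_adjacency_alt (faces : List (List Int)) : List (Int × List Int) :=
  let adj : PySem.Dict Int (PySem.Set Int) :=
    (PySem.List.enumerate faces).foldl
      (fun a p =>
        a.insert p.1
          (p.2.foldl
            (fun s v =>
              (PySem.List.enumerate faces).foldl
                (fun s q => if q.2.contains v then PySem.Set.add s q.1 else s) s)
            PySem.Set.empty))
      PySem.Dict.empty
  adj.items

-- ===== PRECONDITION & SPEC =====
def Spec_build_face_adjacency (faces : List (List Int)) (out : List (Int × List Int)) : Prop := out = build_face_adjacency_alt faces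
instance (faces : List (List Int)) (out : List (Int × List Int)) : Decidable (Spec_build_face_adjacency faces out) := by unfold Spec_build_face_adjacency; infer_instance

-- ===== CLAIM (what is proved, stated in full; the proofs are below) =====
def Claim_equal_build_face_adjacency : Prop := ∀ (faces : List (List Int)), Dom_build_face_adjacency faces → Spec_build_face_adjacency faces (build_face_adjacency faces)

-- ===== LEMMAS AND PROOFS =====

-- adding an element twice is adding it once
theorem pv_add_idem (s : PySem.Set Int) (x : Int) :
    PySem.Set.add (PySem.Set.add s x) x = PySem.Set.add s x := by
  by_cases h : x ∈ s <;> simp [PySem.Set.add, h]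

-- union absorbs a freshly added element of its second argument
theorem pv_union_add (s t : List Int) (x : Int) :
    PySem.Set.union s (PySem.Set.add t x) = PySem.Set.add (PySem.Set.union s t) x := by
  by_cases hx : x ∈ t
  · rw [show PySem.Set.add t x = t from by simp [PySem.Set.add, hx]]
    have hmem : x ∈ PySem.Set.union s t := by simp [PySem.Set.mem_union, hx]
    rw [show PySem.Set.add (PySem.Set.union s t) x = PySem.Set.union s t from by
      simp [PySem.Set.add, hmem]]
  · rw [show PySem.Set.add t x = t ++ [x] from by simp [PySem.Set.add, hx]]
    show (t ++ [x]).foldl PySem.Set.add s = _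
    rw [List.foldl_append]
    rfl

-- union with a conditional-add fold starting from t commutes into the fold's start
theorem pv_union_foldl (l : List (Int × List Int)) (v : Int) (s t : List Int) :
    PySem.Set.union s (l.foldl (fun a q => if q.2.contains v then PySem.Set.add a q.1 else a) t)
      = l.foldl (fun a q => if q.2.contains v then PySem.Set.add a q.1 else a)
          (PySem.Set.union s t) := by
  induction l generalizing t with
  | nil => rfl
  | cons q l ih =>
    simp only [List.foldl_cons]
    by_cases h : q.2.contains v = true
    · rw [if_pos h, if_pos h, ih, pv_union_add]
    · rw [if_neg h, if_neg h, ih]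

-- the entry of v after registering one face's vertex list
theorem pv_inner_face (f : List Int) (d : PySem.Dict Int (PySem.Set Int)) (v fid : Int) :
    (f.foldl (fun d w => d.modify w PySem.Set.empty (fun s => PySem.Set.add s fid)) d).getD v PySem.Set.empty
      = if f.contains v then PySem.Set.add (d.getD v PySem.Set.empty) fid
        else d.getD v PySem.Set.empty := by
  induction f generalizing d with
  | nil => simp
  | cons w f ih =>
    simp only [List.foldl_cons]
    rw [ih, List.contains_cons]
    by_cases hwv : v = w
    · subst hwv
      rw [PySem.Dict.getD_modify_self]
      by_cases hf : f.contains v = true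
      · rw [if_pos hf, pv_add_idem, if_pos (by simp)]
      · rw [if_neg hf, if_pos (by simp)]
    · rw [PySem.Dict.getD_modify_of_ne (hne := hwv),
        show (v == w) = false from beq_eq_false_iff_ne.mpr hwv, Bool.false_or]

-- the vertex_to_faces entry of v is a conditional-add fold over the enumerated faces
theorem pv_vtf_entry (l : List (Int × List Int)) (d : PySem.Dict Int (PySem.Set Int)) (v : Int) :
    (l.foldl (fun d p => p.2.foldl (fun d w => d.modify w PySem.Set.empty (fun s => PySem.Set.add s p.1)) d) d).getD v PySem.Set.empty
      = l.foldl (fun a q => if q.2.contains v then PySem.Set.add a q.1 else a)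
          (d.getD v PySem.Set.empty) := by
  induction l generalizing d with
  | nil => rfl
  | cons p l ih =>
    simp only [List.foldl_cons]
    rw [ih, pv_inner_face]

-- per-face neighbour sets agree between the two ports
theorem pv_neigh_eq (faces : List (List Int)) (f : List Int) (s : List Int) :
    f.foldl
        (fun s v =>
          PySem.Set.union s
            (((PySem.List.enumerate faces).foldl
                (fun d p => p.2.foldl (fun d w => d.modify w PySem.Set.empty (fun s => PySem.Set.add s p.1)) d)
                PySem.Dict.empty).getD v PySem.Set.empty)) s
      = f.foldl
          (fun s v =>
            (PySem.List.enumerate faces).foldl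
              (fun s q => if q.2.contains v then PySem.Set.add s q.1 else s) s)
          s := by
  induction f generalizing s with
  | nil => rfl
  | cons v f ih =>
    simp only [List.foldl_cons]
    have h1 :
        PySem.Set.union s
            (((PySem.List.enumerate faces).foldl
                (fun d p => p.2.foldl (fun d w => d.modify w PySem.Set.empty (fun s => PySem.Set.add s p.1)) d)
                PySem.Dict.empty).getD v PySem.Set.empty)
          = (PySem.List.enumerate faces).foldl
              (fun s q => if q.2.contains v then PySem.Set.add s q.1 else s) s := by
      rw [pv_vtf_entry,
        show ((PySem.Dict.empty : PySem.Dict Int (PySem.Set Int)).getD v PySem.Set.empty)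
            = ([] : List Int) from rfl,
        pv_union_foldl]
      rfl
    rw [h1]
    exact ih _

-- ===== VERDICT (by name: the statement is the Claim_ definition above) =====
theorem build_face_adjacency_spec : Claim_equal_build_face_adjacency := by
  intro faces _
  show build_face_adjacency faces = build_face_adjacency_alt faces
  simp only [build_face_adjacency, build_face_adjacency_alt]
  congr 1
  apply PySem.List.foldl_congr_mem
  intro a p _
  congr 1
  exact pv_neigh_eq faces p.2 PySem.Set.empty
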